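-- pv_equiv track=rewrite | github.com/mabo1215/BodhiPromptShield | src/experiments/tab_matched_baseline_suite.py | _find_literal_spans
-- ===== SOURCE A (Python) =====
-- def _find_literal_spans(text: str, phrase: str) -> list[tuple[int, int]]:
--     spans: list[tuple[int, int]] = []
--     if not phrase:
--         return spans
--     start = 0
--     while True:
--         idx = text.find(phrase, start)
--         if idx == -1:
--             break
--         spans.append((idx, idx + len(phrase)))
--         start = idx + len(phrase)
--     return spans
-- ===== SOURCE B (Python) =====
-- def _find_literal_spans(text: str, phrase: str) -> list[tuple[int, int]]:
--     if not phrase: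
--         return []
--     spans = []
--     i = 0
--     m = len(phrase)
--     while i < len(text):
--         if text.startswith(phrase, i):
--             spans.append((i, i + m))
--             i += m
--         else:
--             i += 1
--     return spans
-- ===== Notes on version B (the rewrite author's own statement) =====
-- stated objective: alternative
-- what changed: Replaces the while-True loop of repeated text.find calls with -1 sentinel and cursor jumps by a single left-to-right scan that tests startswith at each position and steps by len(phrase) on a match, else by 1.
import Mathlib
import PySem

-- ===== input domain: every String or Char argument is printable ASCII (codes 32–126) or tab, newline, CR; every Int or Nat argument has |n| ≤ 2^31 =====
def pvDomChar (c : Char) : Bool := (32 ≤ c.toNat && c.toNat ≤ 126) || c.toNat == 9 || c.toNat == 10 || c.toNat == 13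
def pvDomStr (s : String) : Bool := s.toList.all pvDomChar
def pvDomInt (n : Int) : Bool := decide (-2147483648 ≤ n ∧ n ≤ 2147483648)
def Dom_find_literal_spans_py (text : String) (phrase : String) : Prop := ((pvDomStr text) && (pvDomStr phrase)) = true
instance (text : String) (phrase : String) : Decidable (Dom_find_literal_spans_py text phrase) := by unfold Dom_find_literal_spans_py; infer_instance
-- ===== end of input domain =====

-- B replaces A's repeated text.find with a single left-to-right startswith scan (alternative decomposition, same asymptotics).


-- ===== PORT A =====
-- A's `while True` loop: idx = text.find(phrase, start); stop on -1, else append (idx, idx+len) and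
-- set start = idx + len(phrase). `start` only ever holds non-negative values, kept as Nat; the fuel
-- argument (length+1) only makes the recursion total — each iteration advances start by ≥ 1.
def pvAGo (tl ph : List Char) : Nat → Nat → List (Int × Int)
  | 0, _ => []
  | fuel + 1, start =>
    let idx := PySem.Chars.findFrom tl ph (start : Int) none
    if idx = -1 then []
    else (idx, idx + (ph.length : Int)) :: pvAGo tl ph fuel (idx.toNat + ph.length)

def find_literal_spans_py (text : String) (phrase : String) : List (Int × Int) :=
  if phrase.toList = [] then []
  else pvAGo text.toList phrase.toList (text.toList.length + 1) 0

-- ===== PORT B =====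
-- B's scan: walk the text once; at each position either the (non-empty) phrase starts here — emit
-- the span and skip its length — or advance one character.
def pvBGo (c : Char) (pt : List Char) : List Char → Nat → List (Int × Int)
  | [], _ => []
  | a :: rest, i =>
    if (c :: pt).isPrefixOf (a :: rest) then
      ((i : Int), ((i + (pt.length + 1) : Nat) : Int)) :: pvBGo c pt (rest.drop pt.length) (i + (pt.length + 1))
    else pvBGo c pt rest (i + 1)
  termination_by l _ => l.length
  decreasing_by
  · simp only [List.length_cons, List.length_drop]; omega
  · simp

def find_literal_spans_py_alt (text : String) (phrase : String) : List (Int × Int) :=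
  match phrase.toList with
  | [] => []
  | c :: pt => pvBGo c pt text.toList 0

-- ===== PRECONDITION & SPEC =====
def Spec_find_literal_spans_py (text : String) (phrase : String) (out : List (Int × Int)) : Prop := out = find_literal_spans_py_alt text phrase
instance (text : String) (phrase : String) (out : List (Int × Int)) : Decidable (Spec_find_literal_spans_py text phrase out) := by unfold Spec_find_literal_spans_py; infer_instance

-- ===== CLAIM (what is proved, stated in full; the proofs are below) =====
def Claim_equal_find_literal_spans_py : Prop := ∀ (text : String) (phrase : String), Dom_find_literal_spans_py text phrase → Spec_find_literal_spans_py text phrase (find_literal_spans_py text phrase)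

-- ===== LEMMAS AND PROOFS =====

-- B returns [] on any suffix that contains no occurrence of the phrase.
theorem pvBGo_nil (c : Char) (pt : List Char) (rest : List Char) (i : Nat)
    (h : ¬ (c :: pt) <:+: rest) : pvBGo c pt rest i = [] := by
  induction rest generalizing i with
  | nil => rw [pvBGo]
  | cons a t ih =>
    rw [pvBGo]
    rw [if_neg]
    · exact ih _ (fun hinf => h (List.infix_cons hinf))
    · intro hpre
      exact h ((List.isPrefixOf_iff_prefix.mp hpre).isInfix)

-- B, started at k, walks to the first occurrence j ≥ k, emits its span, and resumes after it.
theorem pvBGo_step (c : Char) (pt : List Char) (tl : List Char) (k j : Nat)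
    (hkj : k ≤ j) (hpre : (c :: pt) <+: tl.drop j)
    (hmin : ∀ i, k ≤ i → i < j → ¬ (c :: pt) <+: tl.drop i) :
    pvBGo c pt (tl.drop k) k =
      ((j : Int), ((j + (pt.length + 1) : Nat) : Int)) ::
        pvBGo c pt (tl.drop (j + (pt.length + 1))) (j + (pt.length + 1)) := by
  have hjlen : j + (pt.length + 1) ≤ tl.length := by
    have := hpre.length_le
    simp only [List.length_cons, List.length_drop] at this
    omega
  obtain ⟨d, hd⟩ : ∃ d, j = k + d := ⟨j - k, by omega⟩
  clear hkj
  induction d generalizing k with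
  | zero =>
    have hkj : j = k := by omega
    subst hkj
    have hjlt : j < tl.length := by omega
    rw [List.drop_eq_getElem_cons hjlt]
    rw [List.drop_eq_getElem_cons hjlt] at hpre
    rw [pvBGo, if_pos (List.isPrefixOf_iff_prefix.mpr hpre)]
    congr 2
    rw [List.drop_drop]
    congr 1
    omega
  | succ d ih =>
    have hklt : k < tl.length := by omega
    rw [List.drop_eq_getElem_cons hklt]
    rw [pvBGo, if_neg]
    · exact ih (k + 1) (fun i h1 h2 => hmin i (by omega) h2) (by omega)
    · intro hp
      exact hmin k (le_refl k) (by omega)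
        (by rw [List.drop_eq_getElem_cons hklt]; exact List.isPrefixOf_iff_prefix.mp hp)

-- The two loops agree from any start position, given enough fuel for A.
theorem pvAGo_eq_pvBGo (tl : List Char) (c : Char) (pt : List Char) :
    ∀ fuel k, k ≤ tl.length → tl.length - k < fuel →
      pvAGo tl (c :: pt) fuel k = pvBGo c pt (tl.drop k) k := by
  intro fuel
  induction fuel with
  | zero => intro k _ h; omega
  | succ f ih =>
    intro k hk hfuel
    simp only [pvAGo]
    by_cases hidx : PySem.Chars.findFrom tl (c :: pt) (k : Int) none = -1
    · rw [if_pos hidx]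
      have := (PySem.Chars.findFrom_natCast_eq_neg_one_iff tl (c :: pt) k hk).mp hidx
      exact (pvBGo_nil c pt (tl.drop k) k this).symm
    · rw [if_neg hidx]
      obtain ⟨hle, hpre, hmin⟩ := PySem.Chars.findFrom_natCast_spec tl (c :: pt) k hk hidx
      set idx := PySem.Chars.findFrom tl (c :: pt) (k : Int) none with hidxdef
      have hidx0 : 0 ≤ idx := le_trans (by exact_mod_cast Int.natCast_nonneg k) hle
      have hidxcast : idx = (idx.toNat : Int) := (Int.toNat_of_nonneg hidx0).symm
      have hklei : k ≤ idx.toNat := by omega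
      have hjlen : idx.toNat + (pt.length + 1) ≤ tl.length := by
        have := hpre.length_le
        simp only [List.length_cons, List.length_drop] at this
        omega
      rw [pvBGo_step c pt tl k idx.toNat hklei hpre hmin]
      congr 1
      · simp only [Prod.mk.injEq]
        refine ⟨hidxcast, ?_⟩
        rw [hidxcast]
        simp only [Int.toNat_natCast, List.length_cons]
        push_cast; ring
      · have hlen : (c :: pt).length = pt.length + 1 := by simp
        rw [hlen]
        exact ih (idx.toNat + (pt.length + 1)) hjlen (by omega)

-- ===== VERDICT (by name: the statement is the Claim_ definition above) =====
theorem find_literal_spans_py_spec : Claim_equal_find_literal_spans_py := by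
  intro text phrase _
  unfold Spec_find_literal_spans_py find_literal_spans_py find_literal_spans_py_alt
  cases h : phrase.toList with
  | nil => simp
  | cons c pt =>
    rw [if_neg (by simp)]
    simpa using pvAGo_eq_pvBGo text.toList c pt (text.toList.length + 1) 0 (Nat.zero_le _) (by omega)
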